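-- pv_equiv track=rewrite | github.com/sgolts/sc_pore_c | pipelines/pore-c-minimal/scripts/align_table_tools.py | group_by_proximity
-- ===== SOURCE A (Python) =====
-- def group_by_proximity(data, threshold):
--
--     """Groups elements in a list within a certain threshold of each other.
--
--     Args:
--     data: A list of integers.
--     threshold: The maximum difference between two elements to be considered in the same group.
--
--     Returns:
--     A list of group labels (integers), where each element represents the group an element in the original data belongs to.
--     """
--     group_id = 0
--     group_labels = [None] * len(data)
--     for i, num in enumerate(data):
--         if not group_labels[i]:
--             group_id += 1
--             group_labels[i] = group_id
--             for j in range(i + 1, len(data)):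
--                 if abs(num - data[j]) <= threshold and not group_labels[j]:
--                     group_labels[j] = group_id
--     return group_labels
-- ===== SOURCE B (Python) =====
-- def group_by_proximity(data, threshold):
--     # One forward pass over the data, keeping only the group "seeds" created so far:
--     # an element joins the earliest-created seed within threshold, else becomes a new seed.
--     seeds = []  # (value, group_id) in creation order
--     labels = []
--     for x in data:
--         gid = next((g for v, g in seeds if abs(x - v) <= threshold), None)
--         if gid is None:
--             gid = len(seeds) + 1
--             seeds.append((x, gid))
--         labels.append(gid)
--     return labels
-- ===== Notes on version B (the rewrite author's own statement) =====
-- stated objective: alternative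
-- what changed: A creates a group per unlabeled element and rescans the whole tail to relabel future elements; B makes one forward pass keeping only the group seeds created so far and labels each element by the first seed within threshold (new seed otherwise), never touching future elements.
import Mathlib
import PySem

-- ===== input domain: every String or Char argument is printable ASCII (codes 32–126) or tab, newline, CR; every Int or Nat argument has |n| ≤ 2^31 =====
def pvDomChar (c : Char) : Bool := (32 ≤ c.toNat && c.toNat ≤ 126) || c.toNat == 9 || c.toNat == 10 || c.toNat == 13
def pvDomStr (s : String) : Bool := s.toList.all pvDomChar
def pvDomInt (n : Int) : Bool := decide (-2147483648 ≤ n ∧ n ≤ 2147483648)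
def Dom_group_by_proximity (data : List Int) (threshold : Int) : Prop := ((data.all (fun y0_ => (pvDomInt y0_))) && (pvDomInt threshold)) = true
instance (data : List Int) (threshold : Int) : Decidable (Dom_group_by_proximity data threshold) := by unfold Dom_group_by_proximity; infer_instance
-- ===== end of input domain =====

-- B replaces A's nested forward-relabelling loops by a single pass that keeps only the
-- group seeds created so far (objective: alternative decomposition; exact same output).

-- ===== PORT A =====
-- inner loop: for j in range(i+1, len(data)): if abs(num-data[j]) <= t and not labels[j]: labels[j] = gid
-- ('not labels[j]' is Python truthiness on Optional[int]: None and 0 are falsy; data[j] is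
-- always in range here, so getD is an exact port of the index access)
def gbpInner (data : List Int) (num t gid : Int) (labels : List (Option Int)) (j : Nat) :
    List (Option Int) :=
  if j < data.length then
    let labels' :=
      if ((num - data.getD j 0).natAbs : Int) ≤ t ∧ (labels.getD j none).getD 0 = 0 then
        labels.set j (some gid)
      else labels
    gbpInner data num t gid labels' (j + 1)
  else labels
termination_by data.length - j

-- outer loop 'for i, num in enumerate(data)' with state (group_id, group_labels)
def gbpOuter (data : List Int) (t : Int) (gid : Int) (labels : List (Option Int)) (i : Nat) :
    List (Option Int) :=
  if i < data.length then
    if (labels.getD i none).getD 0 = 0 then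
      gbpOuter data t (gid + 1)
        (gbpInner data (data.getD i 0) t (gid + 1) (labels.set i (some (gid + 1))) (i + 1)) (i + 1)
    else
      gbpOuter data t gid labels (i + 1)
  else labels
termination_by data.length - i

-- every slot is filled when the loop finishes; the final map only coerces Option Int to Int
def group_by_proximity (data : List Int) (threshold : Int) : List Int :=
  (gbpOuter data threshold 0 (List.replicate data.length none) 0).map (fun o => o.getD 0)

-- ===== PORT B =====
-- 'next((g for v, g in seeds if abs(x - v) <= threshold), None)'
def gbpFind (seeds : List (Int × Int)) (x t : Int) : Option Int :=
  match seeds with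
  | [] => none
  | (v, g) :: rest => if ((x - v).natAbs : Int) ≤ t then some g else gbpFind rest x t

-- 'for x in data: …' with state (seeds, labels); labels is accumulated reversed
def gbpAltLoop (t : Int) (seeds : List (Int × Int)) (acc : List Int) :
    List Int → List Int
  | [] => acc.reverse
  | x :: rest =>
    match gbpFind seeds x t with
    | some g => gbpAltLoop t seeds (g :: acc) rest
    | none =>
        gbpAltLoop t (seeds ++ [(x, (seeds.length : Int) + 1)])
          (((seeds.length : Int) + 1) :: acc) rest

def group_by_proximity_alt (data : List Int) (threshold : Int) : List Int :=
  gbpAltLoop threshold [] [] data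

-- ===== PRECONDITION & SPEC =====
def Spec_group_by_proximity (data : List Int) (threshold : Int) (out : List Int) : Prop := out = group_by_proximity_alt data threshold
instance (data : List Int) (threshold : Int) (out : List Int) : Decidable (Spec_group_by_proximity data threshold out) := by unfold Spec_group_by_proximity; infer_instance

-- ===== CLAIM (what is proved, stated in full; the proofs are below) =====
def Claim_equal_group_by_proximity : Prop := ∀ (data : List Int) (threshold : Int), Dom_group_by_proximity data threshold → Spec_group_by_proximity data threshold (group_by_proximity data threshold)

-- ===== LEMMAS AND PROOFS =====

theorem gbpInner_length (data : List Int) (num t gid : Int) (labels : List (Option Int)) (j : Nat) :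
    (gbpInner data num t gid labels j).length = labels.length := by
  fun_induction gbpInner with
  | case1 =>
      rename_i labels j h labels' ih
      rw [ih]
      simp only [labels']
      split <;> simp
  | case2 => rfl

-- pointwise description of the inner loop
theorem gbpInner_getD (data : List Int) (num t gid : Int) :
    ∀ (n j : Nat) (labels : List (Option Int)), data.length - j ≤ n →
      labels.length = data.length → ∀ k,
    (gbpInner data num t gid labels j).getD k none =
      if j ≤ k ∧ k < data.length ∧ ((num - data.getD k 0).natAbs : Int) ≤ t ∧
          (labels.getD k none).getD 0 = 0 then some gid
      else labels.getD k none := by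
  intro n
  induction n with
  | zero =>
      intro j labels hn hlen k
      rw [gbpInner]
      rw [if_neg (by omega)]
      rw [if_neg (by omega)]
  | succ n ih =>
      intro j labels hn hlen k
      rw [gbpInner]
      by_cases hj : j < data.length
      · rw [if_pos hj]
        simp only []
        set labels' := if ((num - data.getD j 0).natAbs : Int) ≤ t ∧ (labels.getD j none).getD 0 = 0
          then labels.set j (some gid) else labels with hl'
        have hlen' : labels'.length = data.length := by
          rw [hl']; split <;> simp [hlen]
        rw [ih (j+1) labels' (by omega) hlen' k]
        have hset : ∀ m, (labels.set j (some gid)).getD m none =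
            if m = j then some gid else labels.getD m none := by
          intro m
          by_cases hm : m = j
          · subst hm
            simp [List.getD, hlen, hj]
          · simp [List.getD, hm, Ne.symm hm]
        by_cases hcond : ((num - data.getD j 0).natAbs : Int) ≤ t ∧ (labels.getD j none).getD 0 = 0
        · rw [hl', if_pos hcond]
          by_cases hk : k = j
          · subst hk
            rw [if_neg (by omega)]
            rw [hset, if_pos rfl]
            rw [if_pos ⟨le_refl _, hj, hcond.1, hcond.2⟩]
          · rw [hset, if_neg hk]
            by_cases hjk : j + 1 ≤ k
            · have hle : (j ≤ k) := by omega
              by_cases hrest : k < data.length ∧ ((num - data.getD k 0).natAbs : Int) ≤ t ∧ (labels.getD k none).getD 0 = 0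
              · rw [if_pos ⟨hjk, hrest⟩, if_pos ⟨hle, hrest⟩]
              · rw [if_neg (by tauto), if_neg (by tauto)]
            · rw [if_neg (by tauto), if_neg (by omega)]
        · rw [hl', if_neg hcond]
          by_cases hk : k = j
          · subst hk
            rw [if_neg (by omega), if_neg (by tauto)]
          · by_cases hjk : j + 1 ≤ k
            · have hle : (j ≤ k) := by omega
              by_cases hrest : k < data.length ∧ ((num - data.getD k 0).natAbs : Int) ≤ t ∧ (labels.getD k none).getD 0 = 0
              · rw [if_pos ⟨hjk, hrest⟩, if_pos ⟨hle, hrest⟩]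
              · rw [if_neg (by tauto), if_neg (by tauto)]
            · rw [if_neg (by tauto), if_neg (by omega)]
      · rw [if_neg hj, if_neg (by omega)]

theorem gbpFind_append (seeds : List (Int × Int)) (p : Int × Int) (x t : Int) :
    gbpFind (seeds ++ [p]) x t =
      match gbpFind seeds x t with
      | some g => some g
      | none => if ((x - p.1).natAbs : Int) ≤ t then some p.2 else none := by
  induction seeds with
  | nil => simp [gbpFind]
  | cons hd tl ih =>
      obtain ⟨v, g⟩ := hd
      simp only [List.cons_append, gbpFind]
      split <;> simp [ih]

theorem gbpFind_ne_zero (seeds : List (Int × Int)) (x t : Int)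
    (hz : ∀ p ∈ seeds, p.2 ≠ 0) (g : Int) (h : gbpFind seeds x t = some g) : g ≠ 0 := by
  induction seeds with
  | nil => simp [gbpFind] at h
  | cons hd tl ih =>
      obtain ⟨v, g'⟩ := hd
      simp only [gbpFind] at h
      split at h
      · cases h; exact hz (v, g) (by simp)
      · exact ih (fun p hp => hz p (List.mem_cons_of_mem _ hp)) h

theorem gbpAltLoop_acc (t : Int) (l : List Int) (seeds : List (Int × Int)) (acc : List Int) :
    gbpAltLoop t seeds acc l = acc.reverse ++ gbpAltLoop t seeds [] l := by
  induction l generalizing seeds acc with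
  | nil => simp [gbpAltLoop]
  | cons x rest ih =>
      simp only [gbpAltLoop]
      cases gbpFind seeds x t with
      | some g => simp only []; rw [ih, ih seeds [g]]; simp
      | none => simp only []; rw [ih, ih _ [_]]; simp

theorem eq_of_getD (l1 l2 : List (Option Int)) (hlen : l1.length = l2.length)
    (h : ∀ k, k < l1.length → l1.getD k none = l2.getD k none) : l1 = l2 := by
  apply List.ext_getElem hlen
  intro k h1 h2
  have := h k h1
  simpa [List.getD, List.getElem?_eq_getElem, h1, h2] using this

theorem natAbs_sub_comm' (a b : Int) : (a - b).natAbs = (b - a).natAbs := by omega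

-- the main invariant-carrying induction: A's partially-filled label array, restricted to
-- indices ≥ i, always equals 'first seed within threshold' over the seeds created so far
theorem gbpOuter_main (data : List Int) (t : Int) :
    ∀ (n i : Nat) (gid : Int) (labels : List (Option Int)) (seeds : List (Int × Int)),
      data.length - i ≤ n →
      labels.length = data.length →
      gid = (seeds.length : Int) →
      (∀ p ∈ seeds, p.2 ≠ 0) →
      (∀ k, i ≤ k → k < data.length →
        labels.getD k none = gbpFind seeds (data.getD k 0) t) →
      (gbpOuter data t gid labels i).map (fun o => o.getD 0) =
        (labels.take i).map (fun o => o.getD 0) ++ gbpAltLoop t seeds [] (data.drop i) := by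
  intro n
  induction n with
  | zero =>
      intro i gid labels seeds hn hlen hgid hz hinv
      rw [gbpOuter, if_neg (by omega)]
      rw [List.drop_eq_nil_of_le (by omega), List.take_of_length_le (by omega)]
      simp [gbpAltLoop]
  | succ n ih =>
      intro i gid labels seeds hn hlen hgid hz hinv
      by_cases hi : i < data.length
      swap
      · rw [gbpOuter, if_neg hi]
        rw [List.drop_eq_nil_of_le (by omega), List.take_of_length_le (by omega)]
        simp [gbpAltLoop]
      have hx := hinv i (le_refl i) hi
      have hdrop : data.drop i = data.getD i 0 :: data.drop (i + 1) := by
        rw [List.drop_eq_getElem_cons hi]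
        simp [List.getD, List.getElem?_eq_getElem, hi]
      rw [gbpOuter, if_pos hi]
      cases hfind : gbpFind seeds (data.getD i 0) t with
      | some g =>
          have hg : g ≠ 0 := gbpFind_ne_zero seeds _ t hz g hfind
          rw [hfind] at hx
          rw [if_neg (by rw [hx]; simpa using hg)]
          rw [ih (i+1) gid labels seeds (by omega) hlen hgid hz
            (fun k hk1 hk2 => hinv k (by omega) hk2)]
          rw [hdrop]
          simp only [gbpAltLoop, hfind]
          rw [gbpAltLoop_acc t _ seeds [g]]
          have htake : (labels.take (i+1)).map (fun o => o.getD 0) =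
              (labels.take i).map (fun o => o.getD 0) ++ [g] := by
            rw [List.take_succ]
            have hig : labels[i]? = some (some g) := by
              have hil : i < labels.length := by omega
              simpa [List.getD, List.getElem?_eq_getElem, hil] using hx
            simp [hig]
          rw [htake]
          simp
      | none =>
          rw [hfind] at hx
          rw [if_pos (by rw [hx]; rfl)]
          set x := data.getD i 0 with hxdef
          set labels'' := gbpInner data x t (gid + 1) (labels.set i (some (gid + 1))) (i + 1) with hl''
          set seeds' := seeds ++ [(x, gid + 1)] with hs'
          have hlen'' : labels''.length = data.length := by
            rw [hl'', gbpInner_length]; simp [hlen]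
          have hgetD'' : ∀ k, labels''.getD k none =
              (if i + 1 ≤ k ∧ k < data.length ∧ ((x - data.getD k 0).natAbs : Int) ≤ t ∧
                (((labels.set i (some (gid+1))).getD k none).getD 0 = 0) then some (gid + 1)
               else (labels.set i (some (gid+1))).getD k none) := by
            intro k
            rw [hl'', gbpInner_getD data x t (gid+1) (data.length) (i+1) _ (by omega) (by simp [hlen])]
          have hsetk : ∀ k, k ≠ i → (labels.set i (some (gid+1))).getD k none = labels.getD k none := by
            intro k hk
            simp [List.getD, Ne.symm hk, hk]
          have hseti : (labels.set i (some (gid+1))).getD i none = some (gid + 1) := by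
            simp [List.getD, hlen, hi]
          have hz' : ∀ p ∈ seeds', p.2 ≠ 0 := by
            intro p hp
            rw [hs'] at hp
            rcases List.mem_append.mp hp with h | h
            · exact hz p h
            · simp at h
              subst h
              have : (0:Int) ≤ (seeds.length : Int) := by positivity
              simp only [hgid]
              omega
          have hinv' : ∀ k, i + 1 ≤ k → k < data.length →
              labels''.getD k none = gbpFind seeds' (data.getD k 0) t := by
            intro k hk1 hk2
            rw [hgetD'', hsetk k (by omega), hinv k (by omega) hk2, hs', gbpFind_append]
            cases hf2 : gbpFind seeds (data.getD k 0) t with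
            | some g0 =>
                have hg0 : g0 ≠ 0 := gbpFind_ne_zero seeds _ t hz g0 hf2
                simp only []
                rw [if_neg (by
                  rintro ⟨-, -, -, hc⟩
                  simp at hc
                  exact hg0 hc)]
            | none =>
                simp only [Option.getD_none]
                by_cases habs : ((data.getD k 0 - x).natAbs : Int) ≤ t
                · rw [if_pos ⟨hk1, hk2, by rw [natAbs_sub_comm']; exact habs, trivial⟩]
                  rw [if_pos habs]
                · rw [if_neg (by
                    rintro ⟨-, -, hc, -⟩
                    rw [natAbs_sub_comm'] at hc
                    exact habs hc)]
                  rw [if_neg habs]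
          have hrec := ih (i+1) (gid+1) labels'' seeds' (by omega) hlen''
            (by rw [hs']; push_cast; simp [hgid]) hz' hinv'
          rw [hrec]
          rw [hdrop]
          simp only [gbpAltLoop, hfind]
          rw [gbpAltLoop_acc t _ _ [_]]
          have htake'' : (labels''.take (i+1)).map (fun o => o.getD 0) =
              (labels.take i).map (fun o => o.getD 0) ++ [gid + 1] := by
            rw [List.take_succ]
            have hi'' : labels''[i]? = some (some (gid+1)) := by
              have hil : i < labels''.length := by omega
              have hgd : labels''.getD i none = some (gid+1) := by
                rw [hgetD'', if_neg (by omega), hseti]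
              simpa [List.getD, List.getElem?_eq_getElem, hil] using hgd
            have hpre : labels''.take i = labels.take i := by
              apply eq_of_getD
              · simp [hlen'', hlen]
              · intro k hk
                simp only [List.length_take] at hk
                have hki : k < i := by omega
                have h1 : (labels''.take i).getD k none = labels''.getD k none := by
                  simp [List.getD, List.getElem?_take, hki]
                have h2 : (labels.take i).getD k none = labels.getD k none := by
                  simp [List.getD, List.getElem?_take, hki]
                rw [h1, h2, hgetD'', if_neg (by omega), hsetk k (by omega)]
            rw [hpre, hi'']
            simp
          rw [htake'']
          simp [hs', hgid]

-- ===== VERDICT (by name: the statement is the Claim_ definition above) =====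
theorem group_by_proximity_spec : Claim_equal_group_by_proximity := by
  intro data t _
  unfold Spec_group_by_proximity group_by_proximity group_by_proximity_alt
  have h := gbpOuter_main data t data.length 0 0 (List.replicate data.length none) []
    (by omega) (by simp) (by simp) (by simp)
    (by intro k _ hk; simp [gbpFind, List.getD, hk])
  simpa using h
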